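-- pv_equiv track=rewrite | github.com/heewon0107/Algorithm | 프로그래머스/2/340212. ［PCCP 기출문제］ 2번 ／ 퍼즐 게임 챌린지/［PCCP 기출문제］ 2번 ／ 퍼즐 게임 챌린지.py | solution
-- ===== SOURCE A (Python) =====
-- def solution(diffs, times, limit):
--     n = len(diffs)
--
--     l = 1
--     r = max(diffs)
--     answer = max(diffs)
--
--     while l < r:
--         mid = (l + r) // 2
--         time = times[0]
--
--         for i in range(1,n):
--             diff = 0
--             if mid < diffs[i]:
--                 diff = diffs[i] - mid
--
--             time += diff*(times[i] + times[i-1]) + times[i]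
--
--         if time <= limit:
--             answer = mid
--             r = mid
--         else:
--             l = mid + 1
--
--
--     return answer
-- ===== SOURCE B (Python) =====
-- def _prefix_sums(vals):
--     pre = [0]
--     for v in vals:
--         pre.append(pre[-1] + v)
--     return pre
--
--
-- def _bisect_le(a, x):
--     # number of leading elements of (fst-sorted) a that are <= x
--     lo, hi = 0, len(a)
--     while lo < hi:
--         m = (lo + hi) // 2
--         if a[m] <= x:
--             lo = m + 1
--         else:
--             hi = m
--     return lo
--
--
-- def solution(diffs, times, limit):
--     n = len(diffs)
--     top = max(diffs)
--     base = sum(times[:n])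
--     pairs = sorted([(diffs[i], times[i] + times[i - 1]) for i in range(1, n)],
--                    key=lambda p: p[0])
--     ds = [p[0] for p in pairs]
--     pre_dw = _prefix_sums([p[0] * p[1] for p in pairs])
--     pre_w = _prefix_sums([p[1] for p in pairs])
--     total_dw = pre_dw[-1]
--     total_w = pre_w[-1]
--
--     l = 1
--     r = top
--     answer = top
--     while l < r:
--         mid = (l + r) // 2
--         k = _bisect_le(ds, mid)
--         time = base + (total_dw - pre_dw[k]) - mid * (total_w - pre_w[k])
--         if time <= limit:
--             answer = mid
--             r = mid
--         else:
--             l = mid + 1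
--     return answer
-- ===== Notes on version B (the rewrite author's own statement) =====
-- stated objective: faster
-- what changed: A rescans all n levels at every probe of its binary search; B sorts the (level, weight) pairs once, builds prefix sums, and answers each probe with a binary search over the sorted thresholds, keeping the identical outer search.
-- outside the precondition, e.g. on solution([0, -2], [], 3): A returns 0, B raises IndexError; on solution([], [], 0): A raises ValueError, B raises ValueError; on solution([2, 3], [1], 10): A raises IndexError, B raises IndexError
import Mathlib
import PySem

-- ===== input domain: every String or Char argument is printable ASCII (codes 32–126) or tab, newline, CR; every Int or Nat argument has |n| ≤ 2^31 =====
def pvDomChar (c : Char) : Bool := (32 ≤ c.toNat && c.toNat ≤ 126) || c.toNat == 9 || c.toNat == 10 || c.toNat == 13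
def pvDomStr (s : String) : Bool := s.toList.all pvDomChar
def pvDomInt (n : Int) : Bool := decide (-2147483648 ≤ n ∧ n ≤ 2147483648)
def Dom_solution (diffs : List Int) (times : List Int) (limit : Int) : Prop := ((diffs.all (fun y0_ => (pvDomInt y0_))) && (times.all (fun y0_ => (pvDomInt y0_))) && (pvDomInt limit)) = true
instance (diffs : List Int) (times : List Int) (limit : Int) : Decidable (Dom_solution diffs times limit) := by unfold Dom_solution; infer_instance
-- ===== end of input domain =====

-- B replaces A's O(n) per-probe cost scan by sorting the levels once with prefix sums and
-- binary-searching the threshold at each probe (same return value; measurably faster).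

-- ===== PORT A =====

-- time = times[0]; for i in range(1, n): … (the inner cost scan of A)
def timeA (diffs times : List Int) (mid : Int) : Int :=
  (PySem.List.pyRange 1 (diffs.length : Int) 1).foldl
    (fun time i =>
      let diff : Int :=
        if mid < PySem.List.pyGetD diffs i 0 then PySem.List.pyGetD diffs i 0 - mid else 0
      time + diff * (PySem.List.pyGetD times i 0 + PySem.List.pyGetD times (i - 1) 0)
        + PySem.List.pyGetD times i 0)
    (PySem.List.pyGetD times 0 0)

-- while l < r: … (A's outer binary search)
def loopA (diffs times : List Int) (limit l r answer : Int) : Int :=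
  if _h : l < r then
    let mid := PySem.Int.floordiv (l + r) 2
    let time := timeA diffs times mid
    if time ≤ limit then loopA diffs times limit l mid mid
    else loopA diffs times limit (mid + 1) r answer
  else answer
termination_by (r - l).toNat
decreasing_by
  · have h1 : PySem.Int.floordiv (l + r) 2 < r := by
      rw [PySem.Int.floordiv_lt_iff_lt_mul (by omega)]; omega
    have h2 : l ≤ PySem.Int.floordiv (l + r) 2 := by
      rw [PySem.Int.le_floordiv_iff_mul_le (by omega)]; omega
    omega
  · have h1 : PySem.Int.floordiv (l + r) 2 < r := by
      rw [PySem.Int.floordiv_lt_iff_lt_mul (by omega)]; omega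
    have h2' : l ≤ PySem.Int.floordiv (l + r) 2 := by
      rw [PySem.Int.le_floordiv_iff_mul_le (by omega)]; omega
    omega

def solution (diffs : List Int) (times : List Int) (limit : Int) : Int :=
  let r := (PySem.List.max? diffs (fun y => y)).getD 0
  let answer := (PySem.List.max? diffs (fun y => y)).getD 0
  loopA diffs times limit 1 r answer

-- ===== PORT B =====

-- pre = [0]; for v in vals: pre.append(pre[-1] + v)
def prefixSums (vals : List Int) : List Int :=
  vals.foldl (fun pre v => pre ++ [PySem.List.pyGetD pre (-1) 0 + v]) [0]

-- lo, hi = 0, len(a); while lo < hi: …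
def bisectLoop (a : List Int) (x lo hi : Int) : Int :=
  if _h : lo < hi then
    let m := PySem.Int.floordiv (lo + hi) 2
    if PySem.List.pyGetD a m 0 ≤ x then bisectLoop a x (m + 1) hi
    else bisectLoop a x lo m
  else lo
termination_by (hi - lo).toNat
decreasing_by
  · have h1 : PySem.Int.floordiv (lo + hi) 2 < hi := by
      rw [PySem.Int.floordiv_lt_iff_lt_mul (by omega)]; omega
    have h2 : lo ≤ PySem.Int.floordiv (lo + hi) 2 := by
      rw [PySem.Int.le_floordiv_iff_mul_le (by omega)]; omega
    omega
  · have h1 : PySem.Int.floordiv (lo + hi) 2 < hi := by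
      rw [PySem.Int.floordiv_lt_iff_lt_mul (by omega)]; omega
    have h2 : lo ≤ PySem.Int.floordiv (lo + hi) 2 := by
      rw [PySem.Int.le_floordiv_iff_mul_le (by omega)]; omega
    omega

def bisectLe (a : List Int) (x : Int) : Int := bisectLoop a x 0 (a.length : Int)

-- while l < r: … (B's outer binary search, evaluating the cost via the precomputed tables)
def loopB (ds preDW preW : List Int) (base totalDW totalW limit l r answer : Int) : Int :=
  if _h : l < r then
    let mid := PySem.Int.floordiv (l + r) 2
    let k := bisectLe ds mid
    let time := base + (totalDW - PySem.List.pyGetD preDW k 0)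
        - mid * (totalW - PySem.List.pyGetD preW k 0)
    if time ≤ limit then loopB ds preDW preW base totalDW totalW limit l mid mid
    else loopB ds preDW preW base totalDW totalW limit (mid + 1) r answer
  else answer
termination_by (r - l).toNat
decreasing_by
  · have h1 : PySem.Int.floordiv (l + r) 2 < r := by
      rw [PySem.Int.floordiv_lt_iff_lt_mul (by omega)]; omega
    have h2 : l ≤ PySem.Int.floordiv (l + r) 2 := by
      rw [PySem.Int.le_floordiv_iff_mul_le (by omega)]; omega
    omega
  · have h1 : PySem.Int.floordiv (l + r) 2 < r := by
      rw [PySem.Int.floordiv_lt_iff_lt_mul (by omega)]; omega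
    have h2' : l ≤ PySem.Int.floordiv (l + r) 2 := by
      rw [PySem.Int.le_floordiv_iff_mul_le (by omega)]; omega
    omega

def solution_alt (diffs : List Int) (times : List Int) (limit : Int) : Int :=
  let n : Int := (diffs.length : Int)
  let top := (PySem.List.max? diffs (fun y => y)).getD 0
  let base := (PySem.List.slice times none (some n)).sum
  let pairs := PySem.List.sorted
      ((PySem.List.pyRange 1 n 1).map (fun i =>
        (PySem.List.pyGetD diffs i 0,
         PySem.List.pyGetD times i 0 + PySem.List.pyGetD times (i - 1) 0)))
      (fun p => p.1)
  let ds := pairs.map (fun p => p.1)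
  let preDW := prefixSums (pairs.map (fun p => p.1 * p.2))
  let preW := prefixSums (pairs.map (fun p => p.2))
  let totalDW := PySem.List.pyGetD preDW (-1) 0
  let totalW := PySem.List.pyGetD preW (-1) 0
  loopB ds preDW preW base totalDW totalW limit 1 top top

-- ===== PRECONDITION & SPEC =====
-- Pre_ excludes empty diffs (A raises ValueError in max) and times shorter than diffs: there
-- A raises IndexError whenever its search loop runs, and in the degenerate case max(diffs) <= 1
-- (loop never entered) A returns max(diffs) without touching times while B's precomputation
-- still indexes times and raises.
def Pre_solution (diffs : List Int) (times : List Int) (limit : Int) : Prop :=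
  diffs ≠ [] ∧ diffs.length ≤ times.length
instance (diffs : List Int) (times : List Int) (limit : Int) : Decidable (Pre_solution diffs times limit) := by unfold Pre_solution; infer_instance

def pvWitness_solution : List Int × List Int × Int := ([3, 1, 5], [2, 4, 1], 30)

def Spec_solution (diffs : List Int) (times : List Int) (limit : Int) (out : Int) : Prop := out = solution_alt diffs times limit
instance (diffs : List Int) (times : List Int) (limit : Int) (out : Int) : Decidable (Spec_solution diffs times limit out) := by unfold Spec_solution; infer_instance

-- ===== CLAIM (what is proved, stated in full; the proofs are below) =====
def Claim_equal_solution : Prop := ∀ (diffs : List Int) (times : List Int) (limit : Int), Dom_solution diffs times limit → Pre_solution diffs times limit → Spec_solution diffs times limit (solution diffs times limit)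

-- ===== LEMMAS AND PROOFS =====

-- the list of running sums (tail part): scanTail s [v1, v2, …] = [s+v1, s+v1+v2, …]
def scanTail (s : Int) : List Int → List Int
  | [] => []
  | v :: t => (s + v) :: scanTail (s + v) t

-- the raw (unsorted) pair list B builds: (diffs[i], times[i] + times[i-1]) for i in range(1, n)
def pairFn (diffs times : List Int) (i : Int) : Int × Int :=
  (PySem.List.pyGetD diffs i 0, PySem.List.pyGetD times i 0 + PySem.List.pyGetD times (i - 1) 0)

-- the cost contribution of one pair at threshold mid
def gmid (mid : Int) (p : Int × Int) : Int := (if mid < p.1 then p.1 - mid else 0) * p.2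

theorem length_scanTail (s : Int) (vs : List Int) : (scanTail s vs).length = vs.length := by
  induction vs generalizing s with
  | nil => rfl
  | cons v t ih => simp [scanTail, ih]

theorem foldl_prefix (vs : List Int) (acc : List Int) (s : Int)
    (h : PySem.List.pyGetD acc (-1) 0 = s) :
    vs.foldl (fun pre v => pre ++ [PySem.List.pyGetD pre (-1) 0 + v]) acc
      = acc ++ scanTail s vs := by
  induction vs generalizing acc s with
  | nil => simp [scanTail]
  | cons v t ih =>
    simp only [List.foldl_cons, h]
    rw [ih (acc ++ [s + v]) (s + v) (PySem.List.pyGetD_neg_one_append_singleton _ _ _)]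
    simp [scanTail]

theorem prefixSums_eq (vs : List Int) : prefixSums vs = 0 :: scanTail 0 vs := by
  unfold prefixSums
  rw [foldl_prefix vs [0] 0 (by decide)]
  rfl

theorem length_prefixSums (vs : List Int) : (prefixSums vs).length = vs.length + 1 := by
  simp [prefixSums_eq, length_scanTail]

theorem scanTail_getD (vs : List Int) (s : Int) (k : Nat) (hk : k < vs.length) :
    (scanTail s vs).getD k 0 = s + (vs.take (k + 1)).sum := by
  induction vs generalizing s k with
  | nil => simp at hk
  | cons v t ih =>
    cases k with
    | zero => simp [scanTail]
    | succ k' =>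
      simp only [scanTail, List.getD_cons_succ]
      rw [ih (s + v) k' (by simpa using hk)]
      simp [List.take_succ_cons]
      ring

theorem prefixSums_getD (vs : List Int) (k : Nat) (hk : k ≤ vs.length) :
    (prefixSums vs).getD k 0 = (vs.take k).sum := by
  rw [prefixSums_eq]
  cases k with
  | zero => simp
  | succ k' =>
    simp only [List.getD_cons_succ]
    rcases Nat.lt_or_ge k' vs.length with h | h
    · rw [scanTail_getD vs 0 k' h]; simp
    · omega
theorem prefixSums_last (vs : List Int) :
    PySem.List.pyGetD (prefixSums vs) (-1) 0 = vs.sum := by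
  have hne : prefixSums vs ≠ [] := by
    rw [prefixSums_eq]; simp
  rw [PySem.List.pyGetD_neg_one _ _ hne]
  have h1 := length_prefixSums vs
  have h3 : (prefixSums vs).getD vs.length 0 = vs.sum := by
    rw [prefixSums_getD vs vs.length le_rfl, List.take_length]
  rw [List.getLast_eq_getElem, ← h3, List.getD_eq_getElem _ 0 (by omega)]
  have h2 : (prefixSums vs).length - 1 = vs.length := by omega
  simp [h2]

-- bisect loop: the returned index splits a sorted list at threshold x
theorem bisectLoop_spec (a : List Int) (x : Int) (ha : a.Pairwise (· ≤ ·)) :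
    ∀ (n : Nat) (lo hi : Int), (hi - lo).toNat = n → 0 ≤ lo → lo ≤ hi → hi ≤ (a.length : Int) →
    (∀ (j : Nat) (hj : j < a.length), (j : Int) < lo → a[j] ≤ x) →
    (∀ (j : Nat) (hj : j < a.length), hi ≤ (j : Int) → x < a[j]) →
    ∃ k : Nat, bisectLoop a x lo hi = (k : Int) ∧ k ≤ a.length ∧
      (∀ (j : Nat) (hj : j < a.length), j < k → a[j] ≤ x) ∧
      (∀ (j : Nat) (hj : j < a.length), k ≤ j → x < a[j]) := by
  intro n
  induction n using Nat.strong_induction_on with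
  | _ n ih =>
    intro lo hi hn h0 hlohi hhi hlow hhigh
    rw [bisectLoop]
    split_ifs with hlt
    · have hmlo : lo ≤ PySem.Int.floordiv (lo + hi) 2 := by
        rw [PySem.Int.le_floordiv_iff_mul_le (by omega)]; omega
      have hmhi : PySem.Int.floordiv (lo + hi) 2 < hi := by
        rw [PySem.Int.floordiv_lt_iff_lt_mul (by omega)]; omega
      have hmono := List.pairwise_iff_getElem.mp ha
      have hmlen : (PySem.Int.floordiv (lo + hi) 2).toNat < a.length := by omega
      have hget : PySem.List.pyGetD a (PySem.Int.floordiv (lo + hi) 2) 0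
          = a[(PySem.Int.floordiv (lo + hi) 2).toNat] :=
        PySem.List.pyGetD_eq_getElem a 0 (by omega) (by omega)
      simp only [hget]
      split_ifs with hle
      · exact ih (hi - (PySem.Int.floordiv (lo + hi) 2 + 1)).toNat (by omega)
          (PySem.Int.floordiv (lo + hi) 2 + 1) hi rfl (by omega) (by omega) hhi
          (by
            intro j hj hjlt
            have hjm : j ≤ (PySem.Int.floordiv (lo + hi) 2).toNat := by omega
            rcases Nat.lt_or_eq_of_le hjm with h | h
            · exact le_trans (hmono j _ hj hmlen h) hle
            · exact h ▸ hle)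
          hhigh
      · exact ih (PySem.Int.floordiv (lo + hi) 2 - lo).toNat (by omega)
          lo (PySem.Int.floordiv (lo + hi) 2) rfl (by omega) (by omega) (by omega)
          hlow
          (by
            intro j hj hjge
            have hxm : x < a[(PySem.Int.floordiv (lo + hi) 2).toNat] := not_le.mp hle
            have hjm : (PySem.Int.floordiv (lo + hi) 2).toNat ≤ j := by omega
            rcases Nat.lt_or_eq_of_le hjm with h | h
            · exact lt_of_lt_of_le hxm (hmono _ j hmlen hj h)
            · exact h ▸ hxm)
    · exact ⟨lo.toNat, by omega, by omega,
        (by intro j hj hjlt; exact hlow j hj (by omega)),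
        (by intro j hj hjge; exact hhigh j hj (by omega))⟩

theorem bisectLe_spec (a : List Int) (x : Int) (ha : a.Pairwise (· ≤ ·)) :
    ∃ k : Nat, bisectLe a x = (k : Int) ∧ k ≤ a.length ∧
      (∀ (j : Nat) (hj : j < a.length), j < k → a[j] ≤ x) ∧
      (∀ (j : Nat) (hj : j < a.length), k ≤ j → x < a[j]) := by
  unfold bisectLe
  exact bisectLoop_spec a x ha a.length 0 (a.length : Int) (by omega) (by omega) (by omega)
    (by omega) (by intro j hj h; omega) (by intro j hj h; omega)

theorem foldl_add3 (l : List Int) (f g : Int → Int) (a : Int) :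
    l.foldl (fun acc i => acc + f i + g i) a = a + (l.map (fun i => f i + g i)).sum := by
  rw [show (fun (acc i : Int) => acc + f i + g i) = (fun acc i => acc + (f i + g i)) from by
    funext acc i; ring]
  exact PySem.List.foldl_add l _ a

theorem sum_map_sub_mul (l : List (Int × Int)) (mid : Int) :
    (l.map (fun p => (p.1 - mid) * p.2)).sum
      = (l.map (fun p => p.1 * p.2)).sum - mid * (l.map (fun p => p.2)).sum := by
  induction l with
  | nil => simp
  | cons p t ih => simp [ih]; ring

-- the inner cost scan of A, as a closed sum over (level, weight) pairs
theorem timeA_eq (diffs times : List Int) (mid : Int) :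
    timeA diffs times mid
      = PySem.List.pyGetD times 0 0
        + ((PySem.List.pyRange 1 (diffs.length : Int) 1).map
            (fun i => gmid mid (pairFn diffs times i) + PySem.List.pyGetD times i 0)).sum := by
  simp only [timeA]
  rw [foldl_add3 _
      (fun i => (if mid < PySem.List.pyGetD diffs i 0 then PySem.List.pyGetD diffs i 0 - mid else 0)
        * (PySem.List.pyGetD times i 0 + PySem.List.pyGetD times (i - 1) 0))
      (fun i => PySem.List.pyGetD times i 0)]
  simp [gmid, pairFn]

-- the sum of the pair contributions over a fst-sorted list, split at the bisection point
theorem split_sum (ps : List (Int × Int)) (mid : Int) (k : Nat) (hk : k ≤ ps.length)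
    (hlo : ∀ (j : Nat) (hj : j < ps.length), j < k → ps[j].1 ≤ mid)
    (hhi : ∀ (j : Nat) (hj : j < ps.length), k ≤ j → mid < ps[j].1) :
    (ps.map (gmid mid)).sum
      = ((ps.map (fun p => p.1 * p.2)).sum - ((ps.map (fun p => p.1 * p.2)).take k).sum)
        - mid * ((ps.map (fun p => p.2)).sum - ((ps.map (fun p => p.2)).take k).sum) := by
  have e1 : (ps.map (fun p => p.1 * p.2)).sum - ((ps.map (fun p => p.1 * p.2)).take k).sum
      = ((ps.map (fun p => p.1 * p.2)).drop k).sum := by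
    have := List.sum_take_add_sum_drop (ps.map (fun p => p.1 * p.2)) k
    omega
  have e2 : (ps.map (fun p => p.2)).sum - ((ps.map (fun p => p.2)).take k).sum
      = ((ps.map (fun p => p.2)).drop k).sum := by
    have := List.sum_take_add_sum_drop (ps.map (fun p => p.2)) k
    omega
  rw [e1, e2]
  conv_lhs => rw [← List.take_append_drop k ps]
  rw [List.map_append, List.sum_append]
  have hz : ((ps.take k).map (gmid mid)).sum = 0 := by
    apply List.sum_eq_zero
    intro x hx
    obtain ⟨p, hp, rfl⟩ := List.mem_map.mp hx
    obtain ⟨j, hj, hpj⟩ := List.mem_iff_getElem.mp hp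
    have hj' : j < ps.length := by
      simp [List.length_take] at hj; omega
    have hjk : j < k := by
      simp [List.length_take] at hj; omega
    have hpe : p = ps[j] := by
      rw [← hpj]; simp [List.getElem_take]
    subst hpe
    simp [gmid, not_lt.mpr (hlo j hj' hjk)]
  have hcong : (ps.drop k).map (gmid mid) = (ps.drop k).map (fun p => (p.1 - mid) * p.2) := by
    apply List.map_congr_left
    intro p hp
    obtain ⟨j, hj, hpj⟩ := List.mem_iff_getElem.mp hp
    have hj' : k + j < ps.length := by
      simp [List.length_drop] at hj; omega
    have hpe : p = ps[k + j] := by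
      rw [← hpj]; simp [List.getElem_drop]
    have hmid : mid < ps[k + j].1 := hhi (k + j) hj' (by omega)
    subst hpe
    simp [gmid, hmid]
  rw [hz, zero_add, hcong, sum_map_sub_mul, List.map_drop, List.map_drop]

-- B's precomputed-table cost evaluation equals A's scan, at every threshold
theorem cost_eq (diffs times : List Int) (hne : diffs ≠ []) (hlen : diffs.length ≤ times.length)
    (mid : Int) :
    (PySem.List.slice times none (some ((diffs.length : Int)))).sum
      + (PySem.List.pyGetD (prefixSums (((PySem.List.sorted
            ((PySem.List.pyRange 1 (diffs.length : Int) 1).map (pairFn diffs times))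
            (fun p => p.1))).map (fun p => p.1 * p.2))) (-1) 0
         - PySem.List.pyGetD (prefixSums (((PySem.List.sorted
            ((PySem.List.pyRange 1 (diffs.length : Int) 1).map (pairFn diffs times))
            (fun p => p.1))).map (fun p => p.1 * p.2)))
            (bisectLe (((PySem.List.sorted
              ((PySem.List.pyRange 1 (diffs.length : Int) 1).map (pairFn diffs times))
              (fun p => p.1))).map (fun p => p.1)) mid) 0)
      - mid * (PySem.List.pyGetD (prefixSums (((PySem.List.sorted
            ((PySem.List.pyRange 1 (diffs.length : Int) 1).map (pairFn diffs times))
            (fun p => p.1))).map (fun p => p.2))) (-1) 0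
         - PySem.List.pyGetD (prefixSums (((PySem.List.sorted
            ((PySem.List.pyRange 1 (diffs.length : Int) 1).map (pairFn diffs times))
            (fun p => p.1))).map (fun p => p.2)))
            (bisectLe (((PySem.List.sorted
              ((PySem.List.pyRange 1 (diffs.length : Int) 1).map (pairFn diffs times))
              (fun p => p.1))).map (fun p => p.1)) mid) 0)
    = timeA diffs times mid := by
  have h0 : 0 < diffs.length := List.length_pos_iff.mpr hne
  set raw := (PySem.List.pyRange 1 (diffs.length : Int) 1).map (pairFn diffs times) with hraw
  set ps := PySem.List.sorted raw (fun p => p.1) with hps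
  have hperm : ps.Perm raw := PySem.List.sorted_perm _ _ _
  have hpair : ps.Pairwise (fun a b => a.1 ≤ b.1) := PySem.List.sorted_pairwise _ _
  have hds : (ps.map (fun p => p.1)).Pairwise (· ≤ ·) :=
    List.Pairwise.map _ (fun a b h => h) hpair
  obtain ⟨k, hkeq, hk, hklo, hkhi⟩ := bisectLe_spec (ps.map (fun p => p.1)) mid hds
  have hkps : k ≤ ps.length := by simpa using hk
  rw [hkeq, PySem.List.pyGetD_natCast, PySem.List.pyGetD_natCast,
    prefixSums_getD _ k (by simpa using hkps), prefixSums_getD _ k (by simpa using hkps),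
    prefixSums_last, prefixSums_last,
    PySem.List.slice_to_natCast, timeA_eq, PySem.List.sum_map_add_int]
  have hsplit := split_sum ps mid k hkps
    (by
      intro j hj hjk
      have := hklo j (by simpa using hj) hjk
      simpa using this)
    (by
      intro j hj hjk
      have := hkhi j (by simpa using hj) hjk
      simpa using this)
  have hsum_pairs : ((PySem.List.pyRange 1 (diffs.length : Int) 1).map
      (fun i => gmid mid (pairFn diffs times i))).sum = (ps.map (gmid mid)).sum := by
    rw [hraw] at hperm
    have := (hperm.map (gmid mid)).sum_eq
    rw [List.map_map] at this
    exact this.symm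
  have htake : (times.take diffs.length).sum
      = PySem.List.pyGetD times 0 0
        + ((PySem.List.pyRange 1 (diffs.length : Int) 1).map
            (fun i => PySem.List.pyGetD times i 0)).sum := by
    have hmap : (PySem.List.pyRange 0 (diffs.length : Int) 1).map
        (fun i => PySem.List.pyGetD times i 0) = times.take diffs.length := by
      have hlen' : ((times.take diffs.length).length : Int) = (diffs.length : Int) := by
        simp [List.length_take]; omega
      have hbase := PySem.List.map_pyGetD_pyRange_zero' (times.take diffs.length) 0
      rw [hlen'] at hbase
      rw [← hbase]
      apply List.map_congr_left
      intro i hi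
      obtain ⟨hi0, hin⟩ := PySem.List.mem_pyRange_one.mp hi
      rw [PySem.List.pyGetD_eq_getElem times 0 (by omega) (by omega),
        PySem.List.pyGetD_eq_getElem (times.take diffs.length) 0 (by omega) (by omega)]
      simp [List.getElem_take]
    have hsplit : PySem.List.pyRange 0 (diffs.length : Int) 1
        = 0 :: PySem.List.pyRange 1 (diffs.length : Int) 1 := by
      have := PySem.List.pyRange_one_cons (a := 0) (b := (diffs.length : Int)) (by omega)
      simpa using this
    rw [← hmap, hsplit]
    simp
  rw [hsum_pairs, htake]
  linear_combination -hsplit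

-- the two outer binary searches coincide once the per-probe costs do
theorem loop_eq (diffs times ds preDW preW : List Int) (base totalDW totalW limit : Int)
    (hc : ∀ mid, base + (totalDW - PySem.List.pyGetD preDW (bisectLe ds mid) 0)
        - mid * (totalW - PySem.List.pyGetD preW (bisectLe ds mid) 0) = timeA diffs times mid) :
    ∀ (n : Nat) (l r answer : Int), (r - l).toNat = n →
      loopB ds preDW preW base totalDW totalW limit l r answer
        = loopA diffs times limit l r answer := by
  intro n
  induction n using Nat.strong_induction_on with
  | _ n ih =>
    intro l r answer hn
    rw [loopB, loopA]
    split_ifs with hlt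
    · have hmlo : l ≤ PySem.Int.floordiv (l + r) 2 := by
        rw [PySem.Int.le_floordiv_iff_mul_le (by omega)]; omega
      have hmhi : PySem.Int.floordiv (l + r) 2 < r := by
        rw [PySem.Int.floordiv_lt_iff_lt_mul (by omega)]; omega
      simp only [hc]
      split_ifs with hle
      · exact ih _ (by omega) _ _ _ rfl
      · exact ih _ (by omega) _ _ _ rfl
    · rfl

-- ===== VERDICT (by name: the statement is the Claim_ definition above) =====
theorem solution_spec : Claim_equal_solution := by
  intro diffs times limit hdom hpre
  obtain ⟨hne, hlen⟩ := hpre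
  show solution diffs times limit = solution_alt diffs times limit
  unfold solution solution_alt
  exact (loop_eq diffs times _ _ _ _ _ _ limit
    (fun mid => cost_eq diffs times hne hlen mid) _ 1 _ _ rfl).symm
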